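-- pv_equiv track=rewrite | github.com/CaiqueRibeiro/python-algorithms | vectors/problem-2.py | calc
-- ===== SOURCE A (Python) =====
-- def calc(v, n):
--   biggestSum = sum(v[0:n]) # 0 to n - 1
--   factor = n - 1
--   while(factor >= 0):
--     currentSum = 0
--     for i in range(0, factor): # 0 to n - 1
--       currentSum += v[i]
--
--     for i in range(1, n - factor + 1):
--       currentSum += v[len(v) - i]
--
--     factor -= 1
--
--     biggestSum = max(biggestSum, currentSum)
--
--   return biggestSum
-- ===== SOURCE B (Python) =====
-- def calc(v, n):
--     best = cur = sum(v[0:n])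
--     for j in range(1, n + 1):
--         cur += v[-j] - v[n - j]
--         best = max(best, cur)
--     return best
-- ===== Notes on version B (the rewrite author's own statement) =====
-- stated objective: faster
-- what changed: Replaces A's O(n^2) recomputation of the front/back sums for every split by prefix-start plus one incremental sliding update per step (one running sum, O(n)).
-- outside the precondition, e.g. on calc([1, 2, 3], 4): A returns 9, B raises IndexError
import Mathlib
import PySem

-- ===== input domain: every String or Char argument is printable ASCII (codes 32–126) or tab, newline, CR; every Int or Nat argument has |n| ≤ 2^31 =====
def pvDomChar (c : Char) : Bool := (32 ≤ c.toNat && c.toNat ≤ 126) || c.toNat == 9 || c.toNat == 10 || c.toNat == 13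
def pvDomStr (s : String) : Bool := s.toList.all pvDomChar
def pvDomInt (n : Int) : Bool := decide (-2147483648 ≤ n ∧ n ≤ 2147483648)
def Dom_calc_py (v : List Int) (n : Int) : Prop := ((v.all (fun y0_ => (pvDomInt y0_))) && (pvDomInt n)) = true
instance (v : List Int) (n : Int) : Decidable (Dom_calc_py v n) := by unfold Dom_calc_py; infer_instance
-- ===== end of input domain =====

-- B replaces A's quadratic recomputation of every front/back split sum by one incremental sliding pass.

-- ===== PORT A =====
-- the while-loop of A: factor counts down from n-1 to 0
def calcA_loop (v : List Int) (n : Int) (factor : Int) (biggest : Int) : Int :=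
  if _h : factor ≥ 0 then
    -- currentSum = 0; for i in range(0, factor): currentSum += v[i]
    let cur1 := (PySem.List.pyRange 0 factor).foldl
      (fun s i => s + PySem.List.pyGetD v i 0) 0
    -- for i in range(1, n - factor + 1): currentSum += v[len(v) - i]
    let cur := (PySem.List.pyRange 1 (n - factor + 1)).foldl
      (fun s i => s + PySem.List.pyGetD v ((v.length : Int) - i) 0) cur1
    calcA_loop v n (factor - 1) (max biggest cur)
  else biggest
termination_by (factor + 1).toNat
decreasing_by omega

def calc_py (v : List Int) (n : Int) : Int :=
  calcA_loop v n (n - 1) ((PySem.List.slice v (some 0) (some n)).sum)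

-- ===== PORT B =====
def calc_py_alt (v : List Int) (n : Int) : Int :=
  let s := (PySem.List.slice v (some 0) (some n)).sum
  ((PySem.List.pyRange 1 (n + 1)).foldl
    (fun (p : Int × Int) j =>
      let cur := p.1 + PySem.List.pyGetD v (-j) 0 - PySem.List.pyGetD v (n - j) 0
      (cur, max p.2 cur)) (s, s)).2

-- ===== PRECONDITION & SPEC =====
-- Pre_ excludes n > len(v): there A raises IndexError, except at n = len(v)+1 where
-- negative-index wraparound makes A return an accidental double-counted value while B raises.
def Pre_calc_py (v : List Int) (n : Int) : Prop := n ≤ (v.length : Int)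
instance (v : List Int) (n : Int) : Decidable (Pre_calc_py v n) := by unfold Pre_calc_py; infer_instance
def pvWitness_calc_py : List Int × Int := ([1, -2, 3], 2)

def Spec_calc_py (v : List Int) (n : Int) (out : Int) : Prop := out = calc_py_alt v n
instance (v : List Int) (n : Int) (out : Int) : Decidable (Spec_calc_py v n out) := by unfold Spec_calc_py; infer_instance

-- ===== CLAIM (what is proved, stated in full; the proofs are below) =====
def Claim_equal_calc_py : Prop := ∀ (v : List Int) (n : Int), Dom_calc_py v n → Pre_calc_py v n → Spec_calc_py v n (calc_py v n)

-- ===== LEMMAS AND PROOFS =====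

-- candidate value at split j: sum of the first N-j elements plus the last j elements
def gval (v : List Int) (N j : Nat) : Int :=
  (v.take (N - j)).sum + (v.drop (v.length - j)).sum

-- running max of the candidates over a list of split positions
def maxList (v : List Int) (N : Nat) (b : Int) (js : List Nat) : Int :=
  js.foldl (fun acc j => max acc (gval v N j)) b

-- A's first inner loop is the sum of the first f elements
lemma frontSum (v : List Int) (c : Int) (f : Nat) (hf : f ≤ v.length) :
    (PySem.List.pyRange 0 (f : Int)).foldl (fun s i => s + PySem.List.pyGetD v i 0) c
      = c + (v.take f).sum := by
  induction f generalizing c with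
  | zero => simp [PySem.List.pyRange]
  | succ f ih =>
    have hfl : f < v.length := by omega
    rw [show ((f + 1 : Nat) : Int) = (f : Int) + 1 by push_cast; ring,
        PySem.List.pyRange_one_succ_right (by positivity), List.foldl_append,
        ih c (by omega), List.foldl_cons, List.foldl_nil,
        PySem.List.pyGetD_natCast, List.getD_eq_getElem?_getD,
        List.getElem?_eq_getElem hfl, List.take_add_one, List.sum_append]
    simp [List.getElem?_eq_getElem hfl]
    ring

-- A's second inner loop adds the sum of the last m elements
lemma backSum (v : List Int) (c : Int) (m : Nat) (hm : m ≤ v.length) :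
    (PySem.List.pyRange 1 ((m : Int) + 1)).foldl
        (fun s i => s + PySem.List.pyGetD v ((v.length : Int) - i) 0) c
      = c + (v.drop (v.length - m)).sum := by
  induction m generalizing c with
  | zero => simp [PySem.List.pyRange]
  | succ m ih =>
    have hlt : v.length - (m + 1) < v.length := by omega
    rw [show ((m + 1 : Nat) : Int) + 1 = ((m : Int) + 1) + 1 by push_cast; ring,
        PySem.List.pyRange_one_succ_right (by omega), List.foldl_append,
        ih c (by omega), List.foldl_cons, List.foldl_nil,
        show (v.length : Int) - ((m : Int) + 1) = ((v.length - (m + 1) : Nat) : Int) by omega,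
        PySem.List.pyGetD_natCast, List.getD_eq_getElem?_getD,
        List.getElem?_eq_getElem hlt, List.drop_eq_getElem_cons hlt,
        show v.length - (m + 1) + 1 = v.length - m by omega]
    simp; ring

-- B's incremental update moves the split one step
lemma gval_step (v : List Int) (N j : Nat) (hj : j < N) (hN : N ≤ v.length) :
    gval v N j + PySem.List.pyGetD v (-((j : Int) + 1)) 0
      - PySem.List.pyGetD v ((N : Int) - ((j : Int) + 1)) 0 = gval v N (j + 1) := by
  have h2 : v.length - (j + 1) < v.length := by omega
  unfold gval
  rw [show -((j : Int) + 1) = -(((j + 1 : Nat) : Int)) by push_cast; ring,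
      PySem.List.pyGetD_neg_natCast v (j + 1) 0 (by omega) (by omega),
      show (N : Int) - ((j : Int) + 1) = ((N - (j + 1) : Nat) : Int) by omega,
      PySem.List.pyGetD_natCast, List.getD_eq_getElem?_getD,
      List.getElem?_eq_getElem (show N - (j + 1) < v.length by omega),
      show N - j = (N - (j + 1)) + 1 by omega,
      List.take_add_one, List.sum_append,
      List.drop_eq_getElem_cons h2,
      show v.length - (j + 1) + 1 = v.length - j by omega]
  simp [List.getElem?_eq_getElem (show N - (j + 1) < v.length by omega)]
  ring

-- A's while-loop computes the running max of the candidates at splits N-f, …, N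
lemma Aloop (v : List Int) (N : Nat) (hN : N ≤ v.length) (f : Nat) (hf : f < N) (b : Int) :
    calcA_loop v (N : Int) (f : Int) b = maxList v N b (List.range' (N - f) (f + 1)) := by
  induction f generalizing b with
  | zero =>
    rw [calcA_loop, dif_pos (by omega)]
    simp only []
    rw [show (PySem.List.pyRange (0:Int) ((0:Nat):Int)) = [] from by simp [PySem.List.pyRange],
        List.foldl_nil,
        show (N : Int) - ((0:Nat):Int) + 1 = ((N : Int) + 1) by push_cast; ring,
        backSum v 0 N hN,
        calcA_loop, dif_neg (by omega)]
    simp [maxList, gval, List.range']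
  | succ f ih =>
    rw [calcA_loop, dif_pos (by positivity)]
    simp only []
    rw [frontSum v 0 (f + 1) (by omega),
        show (N : Int) - ((f + 1 : Nat) : Int) + 1 = ((N - (f + 1) : Nat) : Int) + 1 by push_cast; omega,
        backSum v _ (N - (f + 1)) (by omega),
        show ((f + 1 : Nat) : Int) - 1 = ((f : Nat) : Int) by push_cast; ring,
        ih (by omega)]
    have hcur : (0:Int) + (v.take (f + 1)).sum + (v.drop (v.length - (N - (f + 1)))).sum
        = gval v N (N - (f + 1)) := by
      unfold gval; rw [show N - (N - (f + 1)) = f + 1 by omega]; ring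
    have hr : List.range' (N - (f + 1)) (f + 1 + 1) = (N - (f + 1)) :: List.range' (N - f) (f + 1) := by
      rw [List.range'_succ, show N - (f + 1) + 1 = N - f by omega]
    rw [hr]
    simp only [maxList, List.foldl_cons, hcur]

-- B's fold from split j with running value gval v N j computes the same running max
lemma Bloop (v : List Int) (N : Nat) (hN : N ≤ v.length) :
    ∀ (d j : Nat), j + d = N → ∀ (best : Int),
    ((PySem.List.pyRange ((j : Int) + 1) ((N : Int) + 1)).foldl
      (fun (p : Int × Int) i =>
        let cur := p.1 + PySem.List.pyGetD v (-i) 0 - PySem.List.pyGetD v ((N : Int) - i) 0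
        (cur, max p.2 cur)) (gval v N j, best)).2
      = maxList v N best (List.range' (j + 1) d) := by
  intro d
  induction d with
  | zero =>
    intro j hj best
    rw [show (PySem.List.pyRange ((j : Int) + 1) ((N : Int) + 1)) = [] from by
          simp [PySem.List.pyRange]; omega,
        List.foldl_nil]
    simp [maxList]
  | succ d ih =>
    intro j hj best
    rw [PySem.List.pyRange_one_cons (by omega), List.foldl_cons]
    simp only []
    rw [gval_step v N j (by omega) hN]
    have hmain := ih (j + 1) (by omega) (max best (gval v N (j + 1)))
    rw [show ((j + 1 : Nat) : Int) + 1 = ((j : Int) + 1) + 1 by push_cast; ring] at hmain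
    rw [hmain, List.range'_succ]
    simp only [maxList, List.foldl_cons]

-- ===== VERDICT (by name: the statement is the Claim_ definition above) =====
theorem calc_py_spec : Claim_equal_calc_py := by
  intro v n _ hpre
  unfold Spec_calc_py
  unfold Pre_calc_py at hpre
  unfold calc_py calc_py_alt
  by_cases hn : n ≤ 0
  · rw [calcA_loop, dif_neg (by omega),
        show (PySem.List.pyRange (1:Int) (n+1)) = [] from by simp [PySem.List.pyRange]; omega]
    simp
  · have hn' : n = (n.toNat : Int) := by omega
    set N := n.toNat with hNdef
    have hNL : N ≤ v.length := by omega
    rw [hn']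
    have hs : (PySem.List.slice v (some 0) (some (N : Int))).sum = gval v N 0 := by
      rw [show ((0:Int)) = ((0:Nat):Int) by norm_num, PySem.List.slice_natCast]
      simp [gval]
    rw [hs]
    rw [show (N:Int) - 1 = ((N - 1 : Nat) : Int) by omega,
        Aloop v N hNL (N-1) (by omega)]
    have hB := Bloop v N hNL N 0 (by omega) (gval v N 0)
    rw [show (((0:Nat) : Int) + 1) = (1:Int) by norm_num] at hB
    rw [hB, show N - (N - 1) = 1 by omega, show N - 1 + 1 = N by omega]
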